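-- pv_equiv track=rewrite | github.com/daDiz/SD-STGCN | baselines/DMP/dmp_pred.py | get_one_snapshot
-- ===== SOURCE A (Python) =====
-- def get_one_snapshot(iterations, step):
--     if step > len(iterations):
--         raise Exception('step must be within len(iterations)')
--
--     g = iterations[0]['status'].copy()
--     N = len(g)
--     for i in range(1, step+1):
--         s = iterations[i]['status']
--         if len(s) > 0:
--             for k in s:
--                 g[k] = s[k]
--
--     return [g[k] for k in range(N)]
-- ===== SOURCE B (Python) =====
-- def get_one_snapshot(iterations, step):
--     if step > len(iterations):
--         raise Exception('step must be within len(iterations)')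
--
--     base = iterations[0]['status']
--     N = len(base)
--     result = {}
--     # scan snapshots in reverse; the first value seen for a key is the last applied one
--     for i in range(step, 0, -1):
--         s = iterations[i]['status']
--         for k, v in s.items():
--             if k not in result:
--                 result[k] = v
--     for k, v in base.items():
--         if k not in result:
--             result[k] = v
--     return [result[k] for k in range(N)]
-- ===== Notes on version B (the rewrite author's own statement) =====
-- stated objective: alternative
-- what changed: Instead of folding the snapshots forward and overwriting keys, B scans snapshots in reverse from step down to the base and fills a fresh dict with first-seen-wins, so each key keeps the value of the last snapshot that set it.
import Mathlib
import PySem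

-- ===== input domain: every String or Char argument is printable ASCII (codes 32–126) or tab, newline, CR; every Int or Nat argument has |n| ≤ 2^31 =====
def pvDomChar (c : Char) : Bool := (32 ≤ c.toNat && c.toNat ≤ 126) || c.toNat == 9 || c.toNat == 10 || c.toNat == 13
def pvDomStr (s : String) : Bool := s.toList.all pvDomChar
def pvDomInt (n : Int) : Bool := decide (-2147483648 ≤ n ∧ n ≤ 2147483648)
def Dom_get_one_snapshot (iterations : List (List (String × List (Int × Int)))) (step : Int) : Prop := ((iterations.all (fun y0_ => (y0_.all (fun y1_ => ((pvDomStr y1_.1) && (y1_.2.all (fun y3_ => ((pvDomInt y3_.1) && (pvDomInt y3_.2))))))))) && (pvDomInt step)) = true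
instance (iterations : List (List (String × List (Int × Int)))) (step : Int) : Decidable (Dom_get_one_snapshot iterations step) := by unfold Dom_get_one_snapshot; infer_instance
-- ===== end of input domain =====

-- B merges the same snapshots by scanning them in reverse with a first-seen-wins dict
-- instead of A's forward overwrite merge; equal cost, different traversal (objective: alternative).

-- shared field accessor: iterations[i]['status'] (empty list as default where Python would raise; Pre_ excludes those inputs)
def pvStatus (iterations : List (List (String × List (Int × Int)))) (i : Int) : PySem.Dict Int Int :=
  PySem.Dict.mk (((PySem.Dict.mk ((PySem.List.pyGet? iterations i).getD [])).get? "status").getD [])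

-- ===== PORT A =====
def get_one_snapshot (iterations : List (List (String × List (Int × Int)))) (step : Int) : List Int :=
  -- 'if step > len(iterations): raise' → outside Pre_
  let g0 := pvStatus iterations 0
  let N : Int := (g0.size : Int)
  let g := (PySem.List.pyRange 1 (step + 1) 1).foldl
    (fun g i =>
      let s := pvStatus iterations i
      if 0 < s.size then
        -- for k in s: g[k] = s[k]
        s.keys.foldl (fun g k => g.insert k ((s.get? k).getD 0)) g
      else g)
    g0
  (PySem.List.pyRange 0 N 1).map (fun k => (g.get? k).getD 0)

-- ===== PORT B =====
-- for k, v in s.items(): if k not in result: result[k] = v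
def pvKeepFirst (r : PySem.Dict Int Int) (s : PySem.Dict Int Int) : PySem.Dict Int Int :=
  s.items.foldl (fun r kv => if r.contains kv.1 then r else r.insert kv.1 kv.2) r

def get_one_snapshot_alt (iterations : List (List (String × List (Int × Int)))) (step : Int) : List Int :=
  let base := pvStatus iterations 0
  let N : Int := (base.size : Int)
  let r := (PySem.List.pyRange step 0 (-1)).foldl
    (fun r i => pvKeepFirst r (pvStatus iterations i)) PySem.Dict.empty
  let r := pvKeepFirst r base
  (PySem.List.pyRange 0 N 1).map (fun k => (r.get? k).getD 0)

-- ===== PRECONDITION & SPEC =====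
-- does iterations[i] (default []) carry the key 'status'?
def pvHasStatus (iterations : List (List (String × List (Int × Int)))) (i : Int) : Bool :=
  ((PySem.List.pyGet? iterations i).getD []).any (fun p => p.1 == "status")

-- Exactly where the Python A returns: the guard step ≤ len passes without the IndexError at
-- iterations[step] (so step < len, and 0 is a valid index), every touched snapshot has a
-- 'status' entry, and every k in range(N) occurs as a key of some touched status dict
-- (otherwise the final comprehension g[k] raises KeyError).
def Pre_get_one_snapshot (iterations : List (List (String × List (Int × Int)))) (step : Int) : Prop :=
  iterations ≠ [] ∧ step < (iterations.length : Int) ∧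
  (∀ i ∈ PySem.List.pyRange 0 (max (step + 1) 1) 1, pvHasStatus iterations i = true) ∧
  (∀ k ∈ PySem.List.pyRange 0 ((pvStatus iterations 0).size : Int) 1,
     ∃ i ∈ PySem.List.pyRange 0 (max (step + 1) 1) 1, k ∈ (pvStatus iterations i).keys)

instance (iterations : List (List (String × List (Int × Int)))) (step : Int) : Decidable (Pre_get_one_snapshot iterations step) := by unfold Pre_get_one_snapshot; infer_instance

def pvWitness_get_one_snapshot : (List (List (String × List (Int × Int)))) × Int :=
  ([[("status", [(0, 5), (1, 7)])], [("status", [(1, 9)])]], 1)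

def Spec_get_one_snapshot (iterations : List (List (String × List (Int × Int)))) (step : Int) (out : List Int) : Prop := out = get_one_snapshot_alt iterations step
instance (iterations : List (List (String × List (Int × Int)))) (step : Int) (out : List Int) : Decidable (Spec_get_one_snapshot iterations step out) := by unfold Spec_get_one_snapshot; infer_instance

-- ===== CLAIM (what is proved, stated in full; the proofs are below) =====
def Claim_equal_get_one_snapshot : Prop := ∀ (iterations : List (List (String × List (Int × Int)))) (step : Int), Dom_get_one_snapshot iterations step → Pre_get_one_snapshot iterations step → Spec_get_one_snapshot iterations step (get_one_snapshot iterations step)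

-- ===== LEMMAS AND PROOFS =====

-- A's inner loop: insert every key of l with a value depending only on the key
theorem pv_overFold_get? (l : List Int) (f : Int → Int) (d : PySem.Dict Int Int) (k : Int) :
    (l.foldl (fun g j => g.insert j (f j)) d).get? k
      = if k ∈ l then some (f k) else d.get? k := by
  induction l generalizing d with
  | nil => simp
  | cons a t ih =>
    simp only [List.foldl_cons, ih, List.mem_cons]
    by_cases hk : k ∈ t
    · simp [hk]
    · by_cases hka : k = a
      · simp [hka, PySem.Dict.get?_insert_self]
      · simp [hk, hka, PySem.Dict.get?_insert_of_ne _ _ hka]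

-- A's snapshot merge, as a lookup: s wins, else the accumulator
theorem pv_mergeOver_get? (s d : PySem.Dict Int Int) (k : Int) :
    (s.keys.foldl (fun g j => g.insert j ((s.get? j).getD 0)) d).get? k
      = (s.get? k).or (d.get? k) := by
  rw [pv_overFold_get?]
  by_cases hk : k ∈ s.keys
  · have : s.contains k = true := (PySem.Dict.contains_iff_mem_keys ..).mpr hk
    rw [PySem.Dict.contains_eq_isSome_get?] at this
    cases h : s.get? k with
    | none => rw [h] at this; simp at this
    | some v => simp [hk]
  · have : ¬ s.contains k = true := fun hc => hk ((PySem.Dict.contains_iff_mem_keys ..).mp hc)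
    rw [PySem.Dict.contains_eq_isSome_get?] at this
    cases h : s.get? k with
    | some v => rw [h] at this; simp at this
    | none => simp [hk]

-- B's snapshot merge, as a lookup: the accumulator wins, else s
theorem pv_keepList_get? (l : List (Int × Int)) (r : PySem.Dict Int Int) (k : Int) :
    (l.foldl (fun r kv => if r.contains kv.1 then r else r.insert kv.1 kv.2) r).get? k
      = (r.get? k).or ((PySem.Dict.mk l).get? k) := by
  induction l generalizing r with
  | nil => simp [PySem.Dict.get?]
  | cons a t ih =>
    simp only [List.foldl_cons]
    by_cases hc : r.contains a.1
    · rw [if_pos hc, ih, PySem.Dict.get?_mk_cons]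
      by_cases hka : a.1 = k
      · rw [PySem.Dict.contains_eq_isSome_get?] at hc
        cases h : r.get? k with
        | none => rw [hka] at hc; rw [h] at hc; simp at hc
        | some v => simp [hka]
      · simp [hka]
    · rw [if_neg hc, ih, PySem.Dict.get?_mk_cons, PySem.Dict.get?_insert]
      by_cases hka : k = a.1
      · rw [PySem.Dict.contains_eq_isSome_get?] at hc
        cases h : r.get? k with
        | some v => rw [hka] at h; rw [h] at hc; simp at hc
        | none => simp [hka]
      · have h2 : ¬ a.1 = k := fun h => hka h.symm
        simp [hka, h2]

theorem pv_keepFirst_get? (s : PySem.Dict Int Int) (r : PySem.Dict Int Int) (k : Int) :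
    (pvKeepFirst r s).get? k = (r.get? k).or (s.get? k) := by
  rw [pvKeepFirst, pv_keepList_get?]

-- A's outer loop, as a lookup chain over the reversed index list
theorem pv_chainA (iterations : List (List (String × List (Int × Int)))) (is : List Int)
    (d : PySem.Dict Int Int) (k : Int) :
    ((is.foldl (fun g i =>
        let s := pvStatus iterations i
        if 0 < s.size then
          s.keys.foldl (fun g j => g.insert j ((s.get? j).getD 0)) g
        else g) d).get? k)
      = (is.reverse.findSome? (fun i => (pvStatus iterations i).get? k)).or (d.get? k) := by
  induction is generalizing d with
  | nil => simp
  | cons i t ih =>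
    simp only [List.foldl_cons, List.reverse_cons, List.findSome?_append, ih,
      List.findSome?_cons, List.findSome?_nil]
    have hbody : (if 0 < (pvStatus iterations i).size then
          (pvStatus iterations i).keys.foldl
            (fun g j => g.insert j (((pvStatus iterations i).get? j).getD 0)) d
        else d).get? k = ((pvStatus iterations i).get? k).or (d.get? k) := by
      by_cases hs : 0 < (pvStatus iterations i).size
      · rw [if_pos hs, pv_mergeOver_get?]
      · rw [if_neg hs]
        unfold PySem.Dict.size at hs
        have hnil : (pvStatus iterations i).items = [] :=
          List.eq_nil_of_length_eq_zero (by omega)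
        have hmk : pvStatus iterations i = PySem.Dict.mk [] := by
          apply PySem.Dict.ext; simpa using hnil
        rw [hmk]
        simp [PySem.Dict.get?]
    rw [hbody]
    cases t.reverse.findSome? (fun i => (pvStatus iterations i).get? k) <;>
      cases (pvStatus iterations i).get? k <;> simp

-- B's outer loop, as a lookup chain in scan order
theorem pv_chainB (iterations : List (List (String × List (Int × Int)))) (is : List Int)
    (r : PySem.Dict Int Int) (k : Int) :
    ((is.foldl (fun r i => pvKeepFirst r (pvStatus iterations i)) r).get? k)
      = (r.get? k).or (is.findSome? (fun i => (pvStatus iterations i).get? k)) := by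
  induction is generalizing r with
  | nil => simp
  | cons i t ih =>
    simp only [List.foldl_cons, ih, pv_keepFirst_get?, List.findSome?_cons]
    cases r.get? k <;> cases (pvStatus iterations i).get? k <;> simp

-- ===== VERDICT (by name: the statement is the Claim_ definition above) =====
theorem get_one_snapshot_spec : Claim_equal_get_one_snapshot := by
  intro iterations step _ _
  unfold Spec_get_one_snapshot get_one_snapshot get_one_snapshot_alt
  apply List.map_eq_map_iff.mpr
  intro k _
  rw [pv_chainA, pv_keepFirst_get?, pv_chainB]
  have hrev : PySem.List.pyRange step 0 (-1) = (PySem.List.pyRange 1 (step + 1) 1).reverse := by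
    simpa using PySem.List.pyRange_neg_one_eq_reverse step 0
  rw [hrev]
  simp [PySem.Dict.get?, PySem.Dict.empty]
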